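-- pv_equiv track=rewrite | github.com/Aasthaengg/IBMdataset | Python_codes/p03096/s292322783.py | guchoku
-- ===== SOURCE A (Python) =====
-- def guchoku(l):
--     assert isinstance(l,list)
--     if len(l) <=2:
--         return 1
--     top_coor = l[0]
--     if top_coor in l[1:] and l[0] != l[1]:
--         _index= l[1:].index(top_coor)
--         return guchoku(l[_index+1:])+ guchoku(l[1:])
--     return guchoku(l[1:])
-- ===== SOURCE B (Python) =====
-- def guchoku(l):
--     # One backward pass: dp for each suffix, with a dict holding the dp value
--     # at the nearest occurrence (to the right) of each element value.
--     at_val = {}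
--     dp = 1
--     prev = None
--     k = 0  # number of elements already processed (length of suffix to the right)
--     for x in reversed(l):
--         if k <= 1:
--             cur = 1
--         elif x in at_val and x != prev:
--             cur = at_val[x] + dp
--         else:
--             cur = dp
--         at_val[x] = cur
--         dp = cur
--         prev = x
--         k += 1
--     return dp
-- ===== Notes on version B (the rewrite author's own statement) =====
-- stated objective: faster
-- what changed: Replaces A's branching suffix recursion (exponential) by a single backward pass that keeps, per element value, the DP value at its nearest occurrence to the right in a dict, so each suffix's count is computed once in O(1).
import Mathlib
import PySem

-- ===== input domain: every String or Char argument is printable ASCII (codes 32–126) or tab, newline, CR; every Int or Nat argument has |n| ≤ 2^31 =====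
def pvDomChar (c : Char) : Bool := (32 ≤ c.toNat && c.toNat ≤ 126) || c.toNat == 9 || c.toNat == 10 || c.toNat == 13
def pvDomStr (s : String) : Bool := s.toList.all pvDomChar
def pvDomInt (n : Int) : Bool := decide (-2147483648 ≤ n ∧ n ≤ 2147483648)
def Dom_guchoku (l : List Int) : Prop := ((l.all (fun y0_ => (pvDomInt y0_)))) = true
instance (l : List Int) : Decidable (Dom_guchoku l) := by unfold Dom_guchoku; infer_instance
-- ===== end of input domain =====

-- B replaces A's exponential branching suffix recursion by one O(n) backward pass with a
-- dict of DP values at each value's nearest occurrence to the right (objective: faster).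

-- ===== PORT A =====
def guchoku (l : List Int) : Int :=
  if _h : l.length ≤ 2 then 1
  else
    let top_coor := (PySem.List.pyGet? l 0).getD 0
    let rest := PySem.List.slice l (some 1) none          -- l[1:]
    if top_coor ∈ rest ∧ PySem.List.pyGet? l 0 ≠ PySem.List.pyGet? l 1 then
      let i := (PySem.List.index? rest top_coor).getD 0   -- l[1:].index(top_coor)
      guchoku (PySem.List.slice l (some ((i : Int) + 1)) none) + guchoku rest
    else
      guchoku rest
termination_by l.length
decreasing_by
  · rw [show ((i : Int) + 1) = ((i + 1 : Nat) : Int) by push_cast; ring,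
        PySem.List.slice_from_natCast]
    simp only [List.length_drop]; omega
  · rw [PySem.List.slice_from_one]; simp only [List.length_tail]; omega
  · rw [PySem.List.slice_from_one]; simp only [List.length_tail]; omega

-- ===== PORT B =====
-- state = (at_val, dp, prev, k); one step of Source B's loop over reversed(l)
def guchokuStep (s : PySem.Dict Int Int × Int × Option Int × Int) (x : Int) :
    PySem.Dict Int Int × Int × Option Int × Int :=
  let (at_val, dp, prev, k) := s
  let cur : Int :=
    if k ≤ 1 then 1
    else if at_val.contains x ∧ some x ≠ prev then at_val.getD x 0 + dp
    else dp
  (at_val.insert x cur, cur, some x, k + 1)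

def guchoku_alt (l : List Int) : Int :=
  (l.reverse.foldl guchokuStep (PySem.Dict.empty, 1, none, 0)).2.1

-- ===== PRECONDITION & SPEC =====
def Spec_guchoku (l : List Int) (out : Int) : Prop := out = guchoku_alt l
instance (l : List Int) (out : Int) : Decidable (Spec_guchoku l out) := by unfold Spec_guchoku; infer_instance

-- ===== CLAIM (what is proved, stated in full; the proofs are below) =====
def Claim_equal_guchoku : Prop := ∀ (l : List Int), Dom_guchoku l → Spec_guchoku l (guchoku l)

-- ===== LEMMAS AND PROOFS =====


theorem guchoku_inv (t : List Int) :
    (t.reverse.foldl guchokuStep (PySem.Dict.empty, 1, none, 0)).2.1 = guchoku t ∧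
    (t.reverse.foldl guchokuStep (PySem.Dict.empty, 1, none, 0)).2.2.1 = t.head? ∧
    (t.reverse.foldl guchokuStep (PySem.Dict.empty, 1, none, 0)).2.2.2 = (t.length : Int) ∧
    (∀ v : Int, (t.reverse.foldl guchokuStep (PySem.Dict.empty, 1, none, 0)).1.get? v =
      (PySem.List.index? t v).map (fun j => guchoku (t.drop j))) := by
  induction t with
  | nil =>
    refine ⟨?_, rfl, rfl, fun v => ?_⟩
    · rw [guchoku]; simp
    · simp [PySem.List.index?_eq_idxOf?, PySem.Dict.get?_empty]
  | cons x t ih =>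
    have hfold : (x :: t).reverse.foldl guchokuStep (PySem.Dict.empty, 1, none, 0)
        = guchokuStep (t.reverse.foldl guchokuStep (PySem.Dict.empty, 1, none, 0)) x := by
      rw [List.reverse_cons, List.foldl_append]; rfl
    rcases hE : (t.reverse.foldl guchokuStep (PySem.Dict.empty, 1, none, 0)) with ⟨d', dp', prev', k'⟩
    rw [hE] at hfold ih
    obtain ⟨hdp, hprev, hk, hdict⟩ := ih
    simp only at hdp hprev hk hdict
    have hcontains : ∀ v : Int, d'.contains v = decide (v ∈ t) := by
      intro v
      rw [PySem.Dict.contains_eq_isSome_get?, hdict v]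
      rcases h : PySem.List.index? t v with _ | j
      · have hnm : v ∉ t := by
          rw [PySem.List.index?_eq_idxOf?] at h; exact List.idxOf?_eq_none_iff.mp h
        simp [hnm]
      · have hm : v ∈ t := (PySem.List.index?_isSome_iff _ _).mp (by rw [h]; rfl)
        simp [hm]
    have hcur : (if k' ≤ 1 then (1 : Int)
        else if d'.contains x ∧ some x ≠ prev' then d'.getD x 0 + dp' else dp')
        = guchoku (x :: t) := by
      by_cases h1 : t.length ≤ 1
      · rw [if_pos (by omega : k' ≤ 1)]
        rw [guchoku, dif_pos (by simp only [List.length_cons]; omega : (x :: t).length ≤ 2)]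
      · rw [if_neg (by omega : ¬ k' ≤ 1)]
        rcases t with _ | ⟨a, t2⟩
        · simp at h1
        rw [guchoku, dif_neg (by simp only [List.length_cons] at h1 ⊢; omega :
              ¬ (x :: a :: t2).length ≤ 2)]
        have hget1 : PySem.List.pyGet? (x :: a :: t2) 1 = some a := by
          simp [PySem.List.pyGet?, PySem.List.pyIdx?]
        have hrest : PySem.List.slice (x :: a :: t2) (some 1) none = a :: t2 := by
          rw [PySem.List.slice_from_one]; rfl
        simp only [PySem.List.pyGet?_zero_cons, hget1, hrest, Option.getD_some]
        have hprev' : prev' = some a := hprev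
        split_ifs with hB hA hA
        · obtain ⟨j, hj⟩ := Option.isSome_iff_exists.mp
            ((PySem.List.index?_isSome_iff _ _).mpr hA.1)
          rw [hj, Option.getD_some]
          have hslice : PySem.List.slice (x :: a :: t2) (some ((j : Int) + 1)) none
              = (a :: t2).drop j := by
            rw [show ((j : Int) + 1) = ((j + 1 : Nat) : Int) by push_cast; ring,
                PySem.List.slice_from_natCast]
            rfl
          rw [hslice, hdp, PySem.Dict.getD_eq_get?_getD, hdict x, hj]
          rfl
        · refine absurd ⟨?_, ?_⟩ hA
          · rw [hcontains x] at hB; exact of_decide_eq_true hB.1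
          · have := hB.2; rw [hprev'] at this; simpa using this
        · refine absurd ⟨?_, ?_⟩ hB
          · rw [hcontains x]; exact decide_eq_true hA.1
          · rw [hprev']; simpa using hA.2
        · exact hdp
    refine ⟨?_, by rw [hfold]; rfl, ?_, ?_⟩
    · rw [hfold]; simp only [guchokuStep]; exact hcur
    · rw [hfold]; simp only [guchokuStep, List.length_cons]; rw [hk]; push_cast; ring
    · intro v
      rw [hfold]
      simp only [guchokuStep]
      rw [PySem.Dict.get?_insert]
      by_cases hv : v = x
      · subst hv
        rw [if_pos rfl, PySem.List.index?_cons_self, Option.map_some]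
        rw [hcur]
        rfl
      · rw [if_neg hv, PySem.List.index?_cons_of_ne _ (Ne.symm hv), hdict v, Option.map_map]
        rcases h : PySem.List.index? t v with _ | j
        · rfl
        · simp [Function.comp, List.drop_succ_cons]

-- ===== VERDICT (by name: the statement is the Claim_ definition above) =====
theorem guchoku_spec : Claim_equal_guchoku := by
  intro l _
  unfold Spec_guchoku guchoku_alt
  exact (guchoku_inv l).1.symm
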